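-- pv_equiv track=rewrite | github.com/Imenturki0/Pac-man-game | main-RL.py | get_pellet_and_powerup_locations
-- ===== SOURCE A (Python) =====
-- def get_pellet_and_powerup_locations(board):
--     """
--     Get the locations of pellets and power-ups on the game board.
--
--     Returns:
--     - pellet_locations (list of tuples): List of tuples representing the (x, y) positions of pellets.
--     - powerup_locations (list of tuples): List of tuples representing the (x, y) positions of power-ups.
--     """
--     pellet_locations = []
--     powerup_locations = []
--
--     for i in range(len(board)):
--         for j in range(len(board[i])):
--             if board[i][j] == 1:  # Pellet
--                 pellet_locations.append((j, i))  # (x, y)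
--             elif board[i][j] == 2:  # Power-up
--                 powerup_locations.append((j, i))  # (x, y)
--
--     return pellet_locations, powerup_locations
-- ===== SOURCE B (Python) =====
-- def get_pellet_and_powerup_locations(board):
--     pellet_locations = [(j, i) for i, row in enumerate(board)
--                         for j, v in enumerate(row) if v == 1]
--     powerup_locations = [(j, i) for i, row in enumerate(board)
--                          for j, v in enumerate(row) if v == 2]
--     return pellet_locations, powerup_locations
-- ===== Notes on version B (the rewrite author's own statement) =====
-- stated objective: idiomatic
-- what changed: A's single nested index-loop with a two-list accumulator and an elif is replaced by two independent enumerate-based comprehension scans of the whole board, one collecting cells equal to 1 and one collecting cells equal to 2.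
import Mathlib
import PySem

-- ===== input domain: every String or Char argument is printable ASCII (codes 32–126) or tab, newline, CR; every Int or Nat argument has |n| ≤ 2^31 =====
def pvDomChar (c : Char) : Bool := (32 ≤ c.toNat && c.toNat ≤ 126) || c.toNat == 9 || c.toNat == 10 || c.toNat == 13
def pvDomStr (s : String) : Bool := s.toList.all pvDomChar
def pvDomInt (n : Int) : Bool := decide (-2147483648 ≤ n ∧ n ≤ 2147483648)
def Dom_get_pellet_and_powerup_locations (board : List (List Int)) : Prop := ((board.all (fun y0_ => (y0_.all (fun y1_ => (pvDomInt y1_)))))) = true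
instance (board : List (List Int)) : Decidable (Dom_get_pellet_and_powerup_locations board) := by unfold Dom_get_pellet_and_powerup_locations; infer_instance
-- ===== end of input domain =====

-- B replaces A's single nested index-loop (elif, two accumulators) by two independent
-- enumerate-based comprehension scans of the board; objective: idiomatic, same cost.


-- ===== PORT A =====
def get_pellet_and_powerup_locations (board : List (List Int)) : (List (Int × Int)) × (List (Int × Int)) :=
  (PySem.List.pyRange 0 board.length 1).foldl
    (fun st i =>
      let row := PySem.List.pyGetD board i []
      (PySem.List.pyRange 0 row.length 1).foldl
        (fun st j =>
          let v := PySem.List.pyGetD row j 0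
          if v = 1 then (st.1 ++ [(j, i)], st.2)
          else if v = 2 then (st.1, st.2 ++ [(j, i)])
          else st) st)
    ([], [])

-- ===== PORT B =====
def get_pellet_and_powerup_locations_alt (board : List (List Int)) : (List (Int × Int)) × (List (Int × Int)) :=
  ((PySem.List.enumerate board 0).flatMap (fun p =>
      (PySem.List.enumerate p.2 0).filterMap (fun q => if q.2 = 1 then some (q.1, p.1) else none)),
   (PySem.List.enumerate board 0).flatMap (fun p =>
      (PySem.List.enumerate p.2 0).filterMap (fun q => if q.2 = 2 then some (q.1, p.1) else none)))

-- ===== PRECONDITION & SPEC =====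
def Spec_get_pellet_and_powerup_locations (board : List (List Int)) (out : (List (Int × Int)) × (List (Int × Int))) : Prop := out = get_pellet_and_powerup_locations_alt board
instance (board : List (List Int)) (out : (List (Int × Int)) × (List (Int × Int))) : Decidable (Spec_get_pellet_and_powerup_locations board out) := by unfold Spec_get_pellet_and_powerup_locations; infer_instance

-- ===== CLAIM (what is proved, stated in full; the proofs are below) =====
def Claim_equal_get_pellet_and_powerup_locations : Prop := ∀ (board : List (List Int)), Dom_get_pellet_and_powerup_locations board → Spec_get_pellet_and_powerup_locations board (get_pellet_and_powerup_locations board)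

-- ===== LEMMAS AND PROOFS =====

-- A's inner loop, seen as a fold over an arbitrary list of (index, value) pairs,
-- appends the 1-cells to the first accumulator and the 2-cells to the second.
theorem pvInner (i : Int) : ∀ (l : List (Int × Int)) (st : List (Int × Int) × List (Int × Int)),
    l.foldl (fun st q =>
        if q.2 = 1 then (st.1 ++ [(q.1, i)], st.2)
        else if q.2 = 2 then (st.1, st.2 ++ [(q.1, i)])
        else st) st
      = (st.1 ++ l.filterMap (fun q => if q.2 = 1 then some (q.1, i) else none),
         st.2 ++ l.filterMap (fun q => if q.2 = 2 then some (q.1, i) else none)) := by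
  intro l
  induction l with
  | nil => intro st; simp
  | cons q t ih =>
    intro st
    simp only [List.foldl_cons, List.filterMap_cons]
    by_cases h1 : q.2 = 1
    · simp [h1, ih]
    · by_cases h2 : q.2 = 2
      · simp [h2, ih]
      · simp [h1, h2, ih]

-- A's outer loop, seen as a fold over an arbitrary list of (index, row) pairs,
-- appends each row's contributions; together this is a flatMap per component.
theorem pvOuter : ∀ (l : List (Int × List Int)) (st : List (Int × Int) × List (Int × Int)),
    l.foldl (fun st p =>
        (PySem.List.enumerate p.2 0).foldl (fun st q =>
          if q.2 = 1 then (st.1 ++ [(q.1, p.1)], st.2)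
          else if q.2 = 2 then (st.1, st.2 ++ [(q.1, p.1)])
          else st) st) st
      = (st.1 ++ l.flatMap (fun p => (PySem.List.enumerate p.2 0).filterMap (fun q => if q.2 = 1 then some (q.1, p.1) else none)),
         st.2 ++ l.flatMap (fun p => (PySem.List.enumerate p.2 0).filterMap (fun q => if q.2 = 2 then some (q.1, p.1) else none))) := by
  intro l
  induction l with
  | nil => intro st; simp
  | cons p t ih =>
    intro st
    simp only [List.foldl_cons, List.flatMap_cons]
    rw [pvInner, ih]
    simp

-- A's indexed loops are the same folds over enumerate board / enumerate row.
theorem pvA_enum (board : List (List Int)) :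
    get_pellet_and_powerup_locations board
      = (PySem.List.enumerate board).foldl (fun st p =>
          (PySem.List.enumerate p.2).foldl (fun st q =>
            if q.2 = 1 then (st.1 ++ [(q.1, p.1)], st.2)
            else if q.2 = 2 then (st.1, st.2 ++ [(q.1, p.1)])
            else st) st) ([], []) := by
  unfold get_pellet_and_powerup_locations
  rw [PySem.List.enumerate_eq_map_pyRange board ([] : List Int), List.foldl_map]
  apply PySem.List.foldl_congr_mem
  intro st i hi
  simp only []
  rw [PySem.List.enumerate_eq_map_pyRange _ (0 : Int), List.foldl_map]
  simp [PySem.List.len]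

-- ===== VERDICT (by name: the statement is the Claim_ definition above) =====
theorem get_pellet_and_powerup_locations_spec : Claim_equal_get_pellet_and_powerup_locations := by
  intro board _
  unfold Spec_get_pellet_and_powerup_locations get_pellet_and_powerup_locations_alt
  rw [pvA_enum, pvOuter]
  simp
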